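-- pv_equiv track=rewrite | github.com/PlayfulMathematician/coins | coins.py | sequenceOfNFlip
-- ===== SOURCE A (Python) =====
-- def nFlip(r,n,k):
--     x=len(r)
--     if k+n>x:
--         r[k:n+k]=list(map((lambda x:1-x),r[k:n+k]))
--         return r
--     else:
--         raise ArithmeticError()
--
-- def sequenceOfNFlip(x,n,bin_list):
--     r=list(map((lambda t: 1),list(range(0,x))))
--     for i,q in enumerate(bin_list):
--         if q==0:
--             continue
--         else:
--             r=nFlip(r,n,i)
--     return r
-- ===== SOURCE B (Python) =====
-- def sequenceOfNFlip(x, n, bin_list):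
--     # Difference-array: accumulate flip parity per position in one pass.
--     size = max(x, 0)
--     diff = [0] * (size + 1)
--     for i, q in enumerate(bin_list):
--         if q == 0:
--             continue
--         lo = min(i, size)
--         hi = min(max(i + n, 0), size)
--         if lo < hi:
--             diff[lo] += 1
--             diff[hi] -= 1
--     out = []
--     acc = 0
--     for p in range(size):
--         acc += diff[p]
--         out.append(1 - acc % 2)
--     return out
-- ===== Notes on version B (the rewrite author's own statement) =====
-- stated objective: faster
-- what changed: Replaces A's per-set-bit O(x) slice rebuild with a difference array accumulated in one pass over bin_list followed by a single prefix-sum parity sweep over the positions.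
import Mathlib
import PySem

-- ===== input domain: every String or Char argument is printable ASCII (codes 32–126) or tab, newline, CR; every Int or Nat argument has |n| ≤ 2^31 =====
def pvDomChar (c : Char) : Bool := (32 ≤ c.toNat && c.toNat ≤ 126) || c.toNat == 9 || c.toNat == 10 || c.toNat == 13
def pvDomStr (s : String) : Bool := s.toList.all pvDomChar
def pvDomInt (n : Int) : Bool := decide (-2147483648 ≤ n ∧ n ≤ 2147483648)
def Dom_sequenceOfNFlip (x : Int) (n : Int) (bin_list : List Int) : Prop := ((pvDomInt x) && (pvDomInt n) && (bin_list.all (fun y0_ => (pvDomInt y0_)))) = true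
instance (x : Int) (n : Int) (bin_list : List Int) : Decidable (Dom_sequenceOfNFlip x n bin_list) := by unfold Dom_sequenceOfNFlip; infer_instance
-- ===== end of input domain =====

-- B replaces A's per-set-bit slice rebuild with a one-pass difference array plus a
-- single prefix-sum parity sweep (objective: faster).

-- ===== PORT A =====
-- nFlip: the explicit 'raise ArithmeticError()' is ported as none (Pre_ excludes it).
-- The slice assignment r[k:n+k] = list(map(lambda x: 1-x, r[k:n+k])) is hand-ported:
-- prefix before the clamped start, the mapped slice (PySem.List.slice, exact), then the
-- suffix from max(clamped start, clamped stop) — exact Python slice-assignment semantics.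
def nFlipA (r : List Int) (n : Int) (k : Int) : Option (List Int) :=
  let x : Int := r.length
  if k + n > x then
    let s0 : Nat := PySem.List.clampIdx r.length k
    let t0 : Nat := PySem.List.clampIdx r.length (n + k)
    some (r.take s0 ++ (PySem.List.slice r (some k) (some (n + k))).map (fun t => 1 - t)
          ++ r.drop (max s0 t0))
  else none

def sequenceOfNFlip (x : Int) (n : Int) (bin_list : List Int) : List Int :=
  let r0 : List Int := (PySem.List.pyRange 0 x 1).map (fun _ => (1 : Int))
  ((PySem.List.enumerate bin_list).foldl
      (fun (acc : Option (List Int)) (iq : Int × Int) =>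
        match acc with
        | none => none
        | some r => if iq.2 == 0 then some r else nFlipA r n iq.1)
      (some r0)).getD []

-- ===== PORT B =====
-- size = max(x,0) is x.toNat; range(size) runs over the Nat size, so it is List.range;
-- diff[p] with 0 ≤ p < len(diff) is read with getD (exact in range).
def sequenceOfNFlip_alt (x : Int) (n : Int) (bin_list : List Int) : List Int :=
  let size : Nat := x.toNat
  let diff : List Int :=
    (PySem.List.enumerate bin_list).foldl
      (fun (diff : List Int) (iq : Int × Int) =>
        if iq.2 == 0 then diff
        else
          let lo : Int := min iq.1 (size : Int)
          let hi : Int := min (max (iq.1 + n) 0) (size : Int)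
          if lo < hi then (diff.modify lo.toNat (fun d => d + 1)).modify hi.toNat (fun d => d - 1)
          else diff)
      (List.replicate (size + 1) 0)
  ((List.range size).foldl
      (fun (st : List Int × Int) (p : Nat) =>
        let acc := st.2 + diff.getD p 0
        (st.1 ++ [1 - PySem.Int.mod acc 2], acc))
      ([], 0)).1

-- ===== PRECONDITION & SPEC =====
-- Pre_: exactly the inputs where A returns — every nonzero bin_list[i] must satisfy
-- i + n > max(x,0) (= len(r)); on any other nonzero entry nFlip raises ArithmeticError.
def Pre_sequenceOfNFlip (x : Int) (n : Int) (bin_list : List Int) : Prop :=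
  ∀ iq ∈ PySem.List.enumerate bin_list, iq.2 ≠ 0 → iq.1 + n > max x 0
instance (x : Int) (n : Int) (bin_list : List Int) : Decidable (Pre_sequenceOfNFlip x n bin_list) := by unfold Pre_sequenceOfNFlip; infer_instance
def pvWitness_sequenceOfNFlip : Int × Int × List Int := (3, 5, [1, 0, 1])

def Spec_sequenceOfNFlip (x : Int) (n : Int) (bin_list : List Int) (out : List Int) : Prop := out = sequenceOfNFlip_alt x n bin_list
instance (x : Int) (n : Int) (bin_list : List Int) (out : List Int) : Decidable (Spec_sequenceOfNFlip x n bin_list out) := by unfold Spec_sequenceOfNFlip; infer_instance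

-- ===== CLAIM (what is proved, stated in full; the proofs are below) =====
def Claim_equal_sequenceOfNFlip : Prop := ∀ (x : Int) (n : Int) (bin_list : List Int), Dom_sequenceOfNFlip x n bin_list → Pre_sequenceOfNFlip x n bin_list → Spec_sequenceOfNFlip x n bin_list (sequenceOfNFlip x n bin_list)

-- ===== LEMMAS AND PROOFS =====

-- Under Pre_ every executed flip covers a suffix [l, size): position p of the result is
-- 1 iff an even number of recorded flip starts l lie at or before p.  Both programs are
-- shown to compute 'pvDecode size los' for the same list of clamped starts 'pvLos'.
def pvDecode (size : Nat) (los : List Nat) : List Int :=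
  (List.range size).map (fun p => if (los.countP (fun l => decide (l ≤ p))) % 2 = 0 then 1 else 0)

def pvLos (size : Nat) (ps : List (Int × Int)) : List Nat :=
  (ps.filter (fun iq => !(iq.2 == 0))).map (fun iq => min iq.1.toNat size)

theorem pv_enum_fst_nonneg {α : Type} (xs : List α) (s : Int) :
    ∀ iq ∈ PySem.List.enumerate xs s, s ≤ iq.1 := by
  induction xs generalizing s with
  | nil => simp [PySem.List.enumerate_nil]
  | cons y ys ih =>
      intro iq hiq
      rw [PySem.List.enumerate_cons] at hiq
      rcases List.mem_cons.mp hiq with h | h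
      · simp [h]
      · have := ih (s + 1) iq h; omega

theorem pv_mod_decode (c : Nat) :
    1 - PySem.Int.mod (c : Int) 2 = if c % 2 = 0 then (1 : Int) else 0 := by
  have h2 : (2 : Int) = ((2 : Nat) : Int) := by norm_num
  rw [h2, PySem.Int.mod_natCast]
  rcases Nat.mod_two_eq_zero_or_one c with h | h <;> simp [h]

theorem pv_decode_snoc (size : Nat) (los : List Nat) (j : Nat) (hj : j ≤ size) :
    pvDecode size (los ++ [j])
      = (pvDecode size los).take j ++ ((pvDecode size los).drop j).map (fun t => 1 - t) := by
  apply List.ext_getElem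
  · simp [pvDecode]; omega
  · intro p hp hp'
    have hps : p < size := by simpa [pvDecode] using hp
    by_cases hpj : p < j
    · rw [List.getElem_append_left (by simp [pvDecode]; omega)]
      rw [List.getElem_take]
      simp only [pvDecode, List.getElem_map, List.getElem_range]
      rw [List.countP_append]
      simp [Nat.not_le.mpr hpj]
    · have hlt : ((pvDecode size los).take j).length ≤ p := by simp [pvDecode]; omega
      rw [List.getElem_append_right hlt]
      simp only [pvDecode, List.getElem_map, List.getElem_range, List.getElem_drop,
        List.length_take, List.length_map, List.length_range]
      rw [List.countP_append]
      have hjp : j ≤ p := by omega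
      have hidx : j + (p - min j size) = p := by omega
      simp only [List.countP_cons, List.countP_nil, decide_eq_true_eq, hidx]
      rw [if_pos hjp]
      rcases Nat.mod_two_eq_zero_or_one (los.countP (fun l => decide (l ≤ p))) with h2 | h2 <;>
        simp [Nat.add_mod, h2]

theorem pv_nFlipA_decode (x n i : Int) (los : List Nat)
    (hi : 0 ≤ i) (h : i + n > max x 0) :
    nFlipA (pvDecode x.toNat los) n i = some (pvDecode x.toNat (los ++ [min i.toNat x.toNat])) := by
  have hlen : (pvDecode x.toNat los).length = x.toNat := by simp [pvDecode]
  have hni : 0 ≤ n + i := by omega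
  have hcond : i + n > ((pvDecode x.toNat los).length : Int) := by rw [hlen]; omega
  simp only [nFlipA]
  rw [if_pos hcond]
  have hs0 : PySem.List.clampIdx (pvDecode x.toNat los).length i = min i.toNat x.toNat := by
    rw [hlen]
    conv_lhs => rw [show i = ((i.toNat : Nat) : Int) by omega]
    rw [PySem.List.clampIdx_natCast]
  have ht0 : PySem.List.clampIdx (pvDecode x.toNat los).length (n + i) = x.toNat := by
    rw [hlen]
    conv_lhs => rw [show n + i = (((n + i).toNat : Nat) : Int) by omega]
    rw [PySem.List.clampIdx_natCast]
    omega
  rw [hs0, ht0]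
  have hslice : PySem.List.slice (pvDecode x.toNat los) (some i) (some (n + i))
      = (pvDecode x.toNat los).drop i.toNat := by
    rw [PySem.List.slice_toNat _ hi hni]
    apply List.take_of_length_le
    simp [hlen]; omega
  rw [hslice]
  have hdropmax : (pvDecode x.toNat los).drop (max (min i.toNat x.toNat) x.toNat) = [] := by
    have : max (min i.toNat x.toNat) x.toNat = x.toNat := by omega
    rw [this]; exact List.drop_eq_nil_of_le (le_of_eq hlen)
  rw [hdropmax]
  have hdrop : (pvDecode x.toNat los).drop i.toNat = (pvDecode x.toNat los).drop (min i.toNat x.toNat) := by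
    rcases Nat.lt_or_ge x.toNat i.toNat with hlt | hle
    · rw [List.drop_eq_nil_of_le (by omega), List.drop_eq_nil_of_le (by rw [hlen]; omega)]
    · rw [Nat.min_eq_left hle]
  rw [hdrop, pv_decode_snoc _ _ _ (by omega)]
  simp

theorem pv_A_fold (x n : Int) (ps : List (Int × Int)) (los : List Nat)
    (hps : ∀ iq ∈ ps, iq.2 ≠ 0 → iq.1 + n > max x 0)
    (hnn : ∀ iq ∈ ps, 0 ≤ iq.1) :
    ps.foldl
      (fun (acc : Option (List Int)) (iq : Int × Int) =>
        match acc with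
        | none => none
        | some r => if iq.2 == 0 then some r else nFlipA r n iq.1)
      (some (pvDecode x.toNat los))
      = some (pvDecode x.toNat (los ++ pvLos x.toNat ps)) := by
  induction ps generalizing los with
  | nil => simp [pvLos]
  | cons iq rest ih =>
      obtain ⟨i, q⟩ := iq
      have hrest1 : ∀ p ∈ rest, p.2 ≠ 0 → p.1 + n > max x 0 :=
        fun p hp => hps p (List.mem_cons_of_mem _ hp)
      have hrest2 : ∀ p ∈ rest, 0 ≤ p.1 :=
        fun p hp => hnn p (List.mem_cons_of_mem _ hp)
      by_cases hq : q = 0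
      · rw [List.foldl_cons]
        simp only [hq]
        rw [show (((0:Int) == 0) = true) from rfl, if_pos rfl]
        rw [ih los hrest1 hrest2]
        simp [pvLos]
      · rw [List.foldl_cons]
        simp only
        rw [if_neg (by simpa using hq)]
        rw [pv_nFlipA_decode x n i los (hnn (i, q) List.mem_cons_self) (hps (i, q) List.mem_cons_self hq)]
        rw [ih (los ++ [min i.toNat x.toNat]) hrest1 hrest2]
        rw [List.append_assoc]
        have hplos : pvLos x.toNat ((i, q) :: rest) = min i.toNat x.toNat :: pvLos x.toNat rest := by
          simp [pvLos, hq]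
        rw [hplos]
        rfl

theorem pv_sum_take_modify (l : List Int) (j m : Nat) (c : Int) :
    (((l.modify j (fun d => d + c)).take m).sum)
      = (l.take m).sum + (if j < m ∧ j < l.length then c else 0) := by
  induction l generalizing j m with
  | nil => simp
  | cons a l ih =>
      cases j with
      | zero =>
          cases m with
          | zero => simp
          | succ m => simp [List.modify_cons]; ring
      | succ j =>
          cases m with
          | zero => simp
          | succ m =>
              simp only [List.modify_cons]
              rw [if_neg (by omega)]
              simp only [Nat.add_sub_cancel, List.take_succ_cons, List.sum_cons, ih, List.length_cons]
              by_cases hc : j < m ∧ j < l.length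
              · rw [if_pos hc, if_pos (by omega)]; ring
              · rw [if_neg hc, if_neg (by omega)]; ring

theorem pv_B_fold (x n : Int) (ps : List (Int × Int)) (diff : List Int)
    (hlen : diff.length = x.toNat + 1)
    (hps : ∀ iq ∈ ps, iq.2 ≠ 0 → iq.1 + n > max x 0)
    (hnn : ∀ iq ∈ ps, 0 ≤ iq.1) :
    (ps.foldl
      (fun (diff : List Int) (iq : Int × Int) =>
        if iq.2 == 0 then diff
        else
          let lo : Int := min iq.1 (x.toNat : Int)
          let hi : Int := min (max (iq.1 + n) 0) (x.toNat : Int)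
          if lo < hi then (diff.modify lo.toNat (fun d => d + 1)).modify hi.toNat (fun d => d - 1)
          else diff) diff).length = x.toNat + 1 ∧
    ∀ m, m ≤ x.toNat →
      ((ps.foldl
      (fun (diff : List Int) (iq : Int × Int) =>
        if iq.2 == 0 then diff
        else
          let lo : Int := min iq.1 (x.toNat : Int)
          let hi : Int := min (max (iq.1 + n) 0) (x.toNat : Int)
          if lo < hi then (diff.modify lo.toNat (fun d => d + 1)).modify hi.toNat (fun d => d - 1)
          else diff) diff).take m).sum
        = (diff.take m).sum + ((pvLos x.toNat ps).countP (fun l => decide (l < m)) : Int) := by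
  induction ps generalizing diff with
  | nil => exact ⟨hlen, by simp [pvLos]⟩
  | cons iq rest ih =>
      obtain ⟨i, q⟩ := iq
      have hrest1 : ∀ p ∈ rest, p.2 ≠ 0 → p.1 + n > max x 0 :=
        fun p hp => hps p (List.mem_cons_of_mem _ hp)
      have hrest2 : ∀ p ∈ rest, 0 ≤ p.1 :=
        fun p hp => hnn p (List.mem_cons_of_mem _ hp)
      by_cases hq : q = 0
      · rw [List.foldl_cons]
        simp only [hq]
        rw [show (((0:Int) == 0) = true) from rfl, if_pos rfl]
        obtain ⟨h1, h2⟩ := ih diff hlen hrest1 hrest2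
        refine ⟨h1, fun m hm => ?_⟩
        rw [h2 m hm]
        simp [pvLos]
      · have hiq : 0 ≤ i := hnn (i, q) List.mem_cons_self
        have hgt : i + n > max x 0 := hps (i, q) List.mem_cons_self hq
        have hhi : min (max (i + n) 0) ((x.toNat : Int)) = (x.toNat : Int) := by omega
        have hlo : (min i ((x.toNat : Int))).toNat = min i.toNat x.toNat := by omega
        rw [List.foldl_cons]
        simp only
        rw [if_neg (by simpa using hq), hhi]
        have hsub : (fun d : Int => d - 1) = (fun d : Int => d + (-1)) := funext fun d => by ring
        by_cases hLT : min i ((x.toNat : Int)) < ((x.toNat : Int))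
        · rw [if_pos hLT]
          set diff' := ((diff.modify (min i ((x.toNat : Int))).toNat (fun d => d + 1)).modify
              ((x.toNat : Int)).toNat (fun d => d - 1)) with hdiff'
          have hlen' : diff'.length = x.toNat + 1 := by simp [hdiff', hlen]
          obtain ⟨h1, h2⟩ := ih diff' hlen' hrest1 hrest2
          refine ⟨h1, fun m hm => ?_⟩
          rw [h2 m hm]
          rw [hdiff', hsub, pv_sum_take_modify, pv_sum_take_modify]
          simp only [Int.toNat_natCast, List.length_modify, hlen, hlo]
          have hplos : pvLos x.toNat ((i, q) :: rest) = min i.toNat x.toNat :: pvLos x.toNat rest := by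
            simp [pvLos, hq]
          rw [hplos, List.countP_cons]
          rw [if_neg (show ¬(x.toNat < m ∧ x.toNat < x.toNat + 1) by omega)]
          by_cases hjm : min i.toNat x.toNat < m
          · rw [if_pos (show (min i.toNat x.toNat < m ∧ min i.toNat x.toNat < x.toNat + 1) by omega)]
            simp only [hjm, decide_true, if_true]
            push_cast
            ring
          · rw [if_neg (show ¬(min i.toNat x.toNat < m ∧ min i.toNat x.toNat < x.toNat + 1) by omega)]
            simp only [hjm, decide_false]
            push_cast
            ring
        · rw [if_neg hLT]
          obtain ⟨h1, h2⟩ := ih diff hlen hrest1 hrest2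
          refine ⟨h1, fun m hm => ?_⟩
          rw [h2 m hm]
          have hplos : pvLos x.toNat ((i, q) :: rest) = min i.toNat x.toNat :: pvLos x.toNat rest := by
            simp [pvLos, hq]
          have hjeq : min i.toNat x.toNat = x.toNat := by omega
          rw [hplos, List.countP_cons, hjeq]
          rw [if_neg (by simp; omega)]
          simp

theorem pv_phase2 (diff : List Int) (size : Nat) (h : size ≤ diff.length) :
    (List.range size).foldl
      (fun (st : List Int × Int) (p : Nat) =>
        let acc := st.2 + diff.getD p 0
        (st.1 ++ [1 - PySem.Int.mod acc 2], acc))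
      ([], 0)
      = ((List.range size).map (fun p => 1 - PySem.Int.mod ((diff.take (p + 1)).sum) 2),
         (diff.take size).sum) := by
  induction size with
  | zero => simp
  | succ k ih =>
      rw [List.range_succ, List.foldl_append, List.map_append]
      rw [ih (by omega)]
      simp only [List.foldl_cons, List.foldl_nil, List.map_cons, List.map_nil]
      have hsum : (diff.take (k + 1)).sum = (diff.take k).sum + diff.getD k 0 := by
        rw [List.getD_eq_getElem diff 0 (by omega), List.sum_take_succ diff k (by omega)]
      rw [hsum]

theorem pv_A_eq_decode (x n : Int) (bin_list : List Int)
    (h : Pre_sequenceOfNFlip x n bin_list) :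
    sequenceOfNFlip x n bin_list
      = pvDecode x.toNat (pvLos x.toNat (PySem.List.enumerate bin_list)) := by
  simp only [sequenceOfNFlip]
  have hr0 : (PySem.List.pyRange 0 x 1).map (fun _ => (1 : Int)) = pvDecode x.toNat [] := by
    rw [PySem.List.pyRange_one]
    simp [pvDecode, Function.comp_def, List.map_const']
  rw [hr0]
  rw [pv_A_fold x n _ [] (fun iq hm hq => h iq hm hq) (pv_enum_fst_nonneg bin_list 0)]
  simp

theorem pv_B_eq_decode (x n : Int) (bin_list : List Int)
    (h : Pre_sequenceOfNFlip x n bin_list) :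
    sequenceOfNFlip_alt x n bin_list
      = pvDecode x.toNat (pvLos x.toNat (PySem.List.enumerate bin_list)) := by
  simp only [sequenceOfNFlip_alt]
  obtain ⟨h1, h2⟩ := pv_B_fold x n (PySem.List.enumerate bin_list)
    (List.replicate (x.toNat + 1) 0) (by simp)
    (fun iq hm hq => h iq hm hq) (pv_enum_fst_nonneg bin_list 0)
  rw [pv_phase2 _ x.toNat (by rw [h1]; omega)]
  simp only [pvDecode]
  refine List.map_congr_left (fun p hp => ?_)
  have hps : p < x.toNat := List.mem_range.mp hp
  rw [h2 (p + 1) (by omega)]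
  have hrep : ((List.replicate (x.toNat + 1) (0 : Int)).take (p + 1)).sum = 0 := by
    rw [List.take_replicate]
    simp
  rw [hrep, zero_add]
  have hcnt : (pvLos x.toNat (PySem.List.enumerate bin_list)).countP (fun l => decide (l < p + 1))
      = (pvLos x.toNat (PySem.List.enumerate bin_list)).countP (fun l => decide (l ≤ p)) := by
    apply List.countP_congr
    intro l _
    simp

  rw [hcnt, pv_mod_decode]

-- ===== VERDICT (by name: the statement is the Claim_ definition above) =====
theorem sequenceOfNFlip_spec : Claim_equal_sequenceOfNFlip := by
  intro x n bl _ hpre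
  unfold Spec_sequenceOfNFlip
  rw [pv_A_eq_decode x n bl hpre, pv_B_eq_decode x n bl hpre]
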